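-- pv_equiv track=rewrite | github.com/Nikolay-Neykov/algorithms | problems/05.luck.py | say_hello
-- ===== SOURCE A (Python) =====
-- def say_hello(k, contests):
--     max_luck = 0
--
--     contests = sorted(contests, key=lambda c: c[0], reverse=True)
--
--     failed = 0
--     for contest in contests:
--         luck = contest[0]
--         importance = contest[1]
--
--         if importance == 0:
--             max_luck += luck
--         elif failed < k:
--             max_luck += luck
--             failed += 1
--         else:
--             max_luck -= luck
--
--     return max_luck
-- ===== SOURCE B (Python) =====
-- def say_hello(k, contests):
--     important = sorted(c[0] for c in contests if c[1])
--     wins = min(k, len(important)) if k > 0 else 0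
--     cut = len(important) - wins
--     return (sum(c[0] for c in contests if not c[1])
--             + sum(important[cut:]) - sum(important[:cut]))
-- ===== Notes on version B (the rewrite author's own statement) =====
-- stated objective: simpler
-- what changed: Instead of sorting the whole pair list with a key lambda and running a stateful failed-counter loop over it, B filters the bare important lucks into one sorted int list and reads the answer off in closed form as unimportant sum plus top-min(k,m) suffix sum minus remaining prefix sum.
import Mathlib
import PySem

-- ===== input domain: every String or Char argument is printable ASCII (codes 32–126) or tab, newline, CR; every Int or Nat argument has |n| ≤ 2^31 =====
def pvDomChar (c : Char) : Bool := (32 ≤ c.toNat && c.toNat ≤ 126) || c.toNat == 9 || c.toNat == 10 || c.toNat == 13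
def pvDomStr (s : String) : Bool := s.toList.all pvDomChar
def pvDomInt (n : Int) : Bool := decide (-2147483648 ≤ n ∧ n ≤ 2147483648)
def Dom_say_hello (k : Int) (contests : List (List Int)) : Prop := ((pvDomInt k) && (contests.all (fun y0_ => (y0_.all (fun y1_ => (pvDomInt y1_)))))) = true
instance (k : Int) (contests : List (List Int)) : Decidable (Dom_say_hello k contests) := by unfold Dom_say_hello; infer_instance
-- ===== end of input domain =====

-- B replaces A's keyed full sort + stateful failed-counter loop by a sort of the bare important
-- lucks and a closed-form suffix/prefix-sum expression (simpler; same return value).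

-- ===== PORT A =====
-- contest[0] / contest[1], defaulted where Python raises IndexError; Pre_ excludes those inputs
def pvLuck (c : List Int) : Int := (PySem.List.pyGet? c 0).getD 0
def pvImp (c : List Int) : Int := (PySem.List.pyGet? c 1).getD 0

-- the body of A's for-loop, state (max_luck, failed)
def pvStepA (k : Int) (st : Int × Int) (contest : List Int) : Int × Int :=
  let luck := pvLuck contest
  let importance := pvImp contest
  if importance == 0 then (st.1 + luck, st.2)
  else if st.2 < k then (st.1 + luck, st.2 + 1)
  else (st.1 - luck, st.2)

def say_hello (k : Int) (contests : List (List Int)) : Int :=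
  let sortedContests := PySem.List.sorted contests (fun c => pvLuck c) true
  (sortedContests.foldl (pvStepA k) (0, 0)).1

-- ===== PORT B =====
-- B's two comprehensions: the important lucks ('[c[0] for c in contests if c[1]]')
-- and the unimportant-luck sum ('sum(c[0] for c in contests if not c[1])')
def pvImpL (L : List (List Int)) : List Int :=
  (L.filter (fun c => !(pvImp c == 0))).map pvLuck
def pvUSum (L : List (List Int)) : Int :=
  ((L.filter (fun c => pvImp c == 0)).map pvLuck).sum

def say_hello_alt (k : Int) (contests : List (List Int)) : Int :=
  let important := PySem.List.sorted (pvImpL contests) (fun x => x) false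
  let wins : Int := if k > 0 then min k (important.length : Int) else 0
  let cut : Int := (important.length : Int) - wins
  pvUSum contests + (PySem.List.slice important (some cut) none).sum
                  - (PySem.List.slice important none (some cut)).sum

-- ===== PRECONDITION & SPEC =====
-- Pre_ excludes exactly the inputs on which Python A raises IndexError: a contest with fewer
-- than two entries (contest[0] in the sort key or contest[1] in the loop); B raises there too.
def Pre_say_hello (k : Int) (contests : List (List Int)) : Prop :=
  ∀ c ∈ contests, 2 ≤ c.length
instance (k : Int) (contests : List (List Int)) : Decidable (Pre_say_hello k contests) := by
  unfold Pre_say_hello; infer_instance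
def pvWitness_say_hello : Int × List (List Int) := (2, [[5, 1], [-3, 1], [2, 0], [4, 1]])

def Spec_say_hello (k : Int) (contests : List (List Int)) (out : Int) : Prop := out = say_hello_alt k contests
instance (k : Int) (contests : List (List Int)) (out : Int) : Decidable (Spec_say_hello k contests out) := by unfold Spec_say_hello; infer_instance

-- ===== CLAIM (what is proved, stated in full; the proofs are below) =====
def Claim_equal_say_hello : Prop := ∀ (k : Int) (contests : List (List Int)), Dom_say_hello k contests → Pre_say_hello k contests → Spec_say_hello k contests (say_hello k contests)

-- ===== LEMMAS AND PROOFS =====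

-- A's loop restricted to the important lucks, carrying the 'failed' counter
def pvG (k : Int) : Int → List Int → Int
  | _, [] => 0
  | f, x :: t => if f < k then x + pvG k (f + 1) t else pvG k f t - x

theorem pvLoopA (k : Int) (L : List (List Int)) (m f : Int) :
    (L.foldl (pvStepA k) (m, f)).1 = m + pvUSum L + pvG k f (pvImpL L) := by
  induction L generalizing m f with
  | nil => simp [pvUSum, pvImpL, pvG]
  | cons c t ih =>
    by_cases h : pvImp c == 0
    · rw [List.foldl_cons, show pvStepA k (m, f) c = (m + pvLuck c, f) by simp [pvStepA, h], ih]
      simp [pvUSum, pvImpL, h]; ring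
    · by_cases hf : f < k
      · rw [List.foldl_cons,
          show pvStepA k (m, f) c = (m + pvLuck c, f + 1) by simp [pvStepA, h, hf], ih]
        simp [pvUSum, pvImpL, pvG, h, hf]; ring
      · rw [List.foldl_cons,
          show pvStepA k (m, f) c = (m - pvLuck c, f) by simp [pvStepA, h, hf], ih]
        simp [pvUSum, pvImpL, pvG, h, hf]; ring

theorem pvG_split (k : Int) (f : Int) (xs : List Int) :
    pvG k f xs = (xs.take (min (k - f).toNat xs.length)).sum
               - (xs.drop (min (k - f).toNat xs.length)).sum := by
  induction xs generalizing f with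
  | nil => simp [pvG]
  | cons x t ih =>
    by_cases hf : f < k
    · have h1 : min (k - f).toNat (x :: t).length
          = min (k - (f + 1)).toNat t.length + 1 := by
        simp only [List.length_cons]; omega
      rw [pvG, if_pos hf, ih (f + 1), h1]
      simp; ring
    · have h0 : (k - f).toNat = 0 := by omega
      rw [pvG, if_neg hf, ih f]
      simp [h0]; ring

-- sortedness (descending) of the important lucks of A's reverse-sorted contest list
theorem pvD_pairwise (contests : List (List Int)) :
    (pvImpL (PySem.List.sorted contests (fun c => pvLuck c) true)).Pairwise (fun a b => b ≤ a) := by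
  have h := PySem.List.sorted_pairwise_rev (xs := contests) (key := fun c => pvLuck c)
  have h2 := h.sublist (List.filter_sublist
    (l := PySem.List.sorted contests (fun c => pvLuck c) true)
    (p := fun c => !(pvImp c == 0)))
  exact (List.pairwise_map).2 h2

-- A's descending important-luck list IS the reverse of B's ascending sort
theorem pvD_eq_reverse (contests : List (List Int)) :
    pvImpL (PySem.List.sorted contests (fun c => pvLuck c) true)
      = (PySem.List.sorted (pvImpL contests) (fun x => x) false).reverse := by
  have hperm : (pvImpL (PySem.List.sorted contests (fun c => pvLuck c) true)).Perm
      ((PySem.List.sorted (pvImpL contests) (fun x => x) false).reverse) :=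
    (((PySem.List.sorted_perm (xs := contests) (key := fun c => pvLuck c)
      (rev := true)).filter _).map _).trans
      ((PySem.List.sorted_perm (xs := pvImpL contests) (key := fun x => x)
        (rev := false)).symm.trans (List.reverse_perm _).symm)
  exact hperm.eq_of_pairwise (fun a b _ _ x y => le_antisymm y x) (pvD_pairwise contests)
    ((List.pairwise_reverse).2
      (PySem.List.sorted_pairwise (xs := pvImpL contests) (key := fun x => x)))

theorem say_hello_eq (k : Int) (contests : List (List Int)) :
    say_hello k contests = say_hello_alt k contests := by
  have hU : pvUSum (PySem.List.sorted contests (fun c => pvLuck c) true) = pvUSum contests :=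
    List.Perm.sum_eq ((((PySem.List.sorted_perm (xs := contests)
      (key := fun c => pvLuck c) (rev := true)).filter _).map _))
  set Asc := PySem.List.sorted (pvImpL contests) (fun x => x) false with hAsc
  have hLen : Asc.length = (pvImpL contests).length :=
    List.Perm.length_eq (PySem.List.sorted_perm _ _ _)
  -- the Nat number of wins and of losses
  set t : Nat := min k.toNat Asc.length with ht
  have htle : t ≤ Asc.length := by omega
  have hcut : ((Asc.length : Int) - (if k > 0 then min k (Asc.length : Int) else 0))
      = ((Asc.length - t : Nat) : Int) := by
    by_cases hk : k > 0
    · simp [hk, ht]; omega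
    · simp [hk, ht]; omega
  unfold say_hello say_hello_alt
  rw [pvLoopA, pvG_split, pvD_eq_reverse contests]
  simp only [← hAsc, hcut,
    PySem.List.slice_from_natCast, PySem.List.slice_to_natCast,
    List.length_reverse, List.take_reverse, List.drop_reverse]
  rw [List.sum_reverse_int, List.sum_reverse_int]
  have h1 : min (k - 0).toNat Asc.length = t := by omega
  rw [h1, hU]
  ring

-- ===== VERDICT (by name: the statement is the Claim_ definition above) =====
theorem say_hello_spec : Claim_equal_say_hello := by
  intro k contests _ _
  unfold Spec_say_hello
  exact say_hello_eq k contests
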